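-- pv_equiv track=rewrite | github.com/Lorezon173/LeetCode | 3741.三个相等元素之间的最小距离-ii.py | findmini2
-- ===== SOURCE A (Python) =====
-- def findmini2(nums):
--     # x,y,z=[0]*3
--     diff=[]
--     for i in range(1,len(nums)):
--         diff.append(nums[i]-nums[i-1])
--     interval_min=diff[1]+diff[0]
--     for i in range(2,len(diff)):
--         if diff[i]+diff[i-1]<interval_min:
--             interval_min=diff[i]+diff[i-1]
--     return interval_min
-- ===== SOURCE B (Python) =====
-- def findmini2(nums):
--     interval_min = nums[2] - nums[0]
--     for i in range(3, len(nums)):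
--         cand = nums[i] - nums[i - 2]
--         if cand < interval_min:
--             interval_min = cand
--     return interval_min
-- ===== Notes on version B (the rewrite author's own statement) =====
-- stated objective: simpler
-- what changed: B drops the intermediate diff list entirely: since diff[i]+diff[i-1] telescopes to nums[i+1]-nums[i-1], B does one direct scan over nums keeping a running minimum of nums[i]-nums[i-2], allocating no auxiliary list.
import Mathlib
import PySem

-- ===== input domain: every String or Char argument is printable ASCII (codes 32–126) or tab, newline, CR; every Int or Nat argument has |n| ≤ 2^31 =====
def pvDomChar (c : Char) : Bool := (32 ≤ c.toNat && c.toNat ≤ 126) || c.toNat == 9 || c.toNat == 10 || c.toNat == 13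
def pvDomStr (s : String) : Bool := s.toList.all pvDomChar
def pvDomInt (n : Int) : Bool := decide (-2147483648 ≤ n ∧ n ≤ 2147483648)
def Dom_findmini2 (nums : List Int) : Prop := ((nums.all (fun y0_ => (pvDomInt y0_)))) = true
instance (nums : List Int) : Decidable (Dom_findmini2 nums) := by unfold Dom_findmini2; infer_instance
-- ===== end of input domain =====

-- B eliminates A's intermediate diff list: diff[i]+diff[i-1] telescopes to nums[i+1]-nums[i-1],
-- so B scans nums once keeping a running minimum of nums[i]-nums[i-2] (simpler, O(1) extra space).


-- ===== PORT A =====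
def findmini2 (nums : List Int) : Int :=
  let diff := (PySem.List.pyRange 1 (nums.length : Int) 1).foldl
    (fun d i => d ++ [PySem.List.pyGetD nums i 0 - PySem.List.pyGetD nums (i - 1) 0]) []
  let interval_min := PySem.List.pyGetD diff 1 0 + PySem.List.pyGetD diff 0 0
  (PySem.List.pyRange 2 (diff.length : Int) 1).foldl
    (fun m i =>
      if PySem.List.pyGetD diff i 0 + PySem.List.pyGetD diff (i - 1) 0 < m then
        PySem.List.pyGetD diff i 0 + PySem.List.pyGetD diff (i - 1) 0
      else m) interval_min

-- ===== PORT B =====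
def findmini2_alt (nums : List Int) : Int :=
  (PySem.List.pyRange 3 (nums.length : Int) 1).foldl
    (fun m i =>
      let cand := PySem.List.pyGetD nums i 0 - PySem.List.pyGetD nums (i - 2) 0
      if cand < m then cand else m)
    (PySem.List.pyGetD nums 2 0 - PySem.List.pyGetD nums 0 0)

-- ===== PRECONDITION & SPEC =====
-- Pre_ excludes lists with fewer than 3 elements, on which the Python A raises IndexError
-- (diff has fewer than 2 entries); B also raises IndexError there.
def Pre_findmini2 (nums : List Int) : Prop := 3 ≤ nums.length
instance (nums : List Int) : Decidable (Pre_findmini2 nums) := by unfold Pre_findmini2; infer_instance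
def pvWitness_findmini2 : List Int := [5, 1, 9, 2]

def Spec_findmini2 (nums : List Int) (out : Int) : Prop := out = findmini2_alt nums
instance (nums : List Int) (out : Int) : Decidable (Spec_findmini2 nums out) := by unfold Spec_findmini2; infer_instance

-- ===== CLAIM (what is proved, stated in full; the proofs are below) =====
def Claim_equal_findmini2 : Prop := ∀ (nums : List Int), Dom_findmini2 nums → Pre_findmini2 nums → Spec_findmini2 nums (findmini2 nums)

-- ===== LEMMAS AND PROOFS =====

-- the adjacent difference A stores at diff's slot (i-1), as a function of the Int index i
def pvF (nums : List Int) (i : Int) : Int :=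
  PySem.List.pyGetD nums i 0 - PySem.List.pyGetD nums (i - 1) 0

-- indexing into A's diff list in terms of pvF
theorem pvDiff_get (nums : List Int) (i : Int) (h0 : 0 ≤ i) (h1 : i < (nums.length : Int) - 1) :
    PySem.List.pyGetD ((PySem.List.pyRange 1 (nums.length : Int) 1).map (pvF nums)) i 0 =
      pvF nums (1 + i) := by
  obtain ⟨k, rfl⟩ := Int.eq_ofNat_of_zero_le h0
  exact PySem.List.pyGetD_map_pyRange_one (pvF nums) 1 _ k 0 (by omega)

-- a fold that minimizes g over a range is the fold of plain min over the mapped range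
theorem pvFoldl_min_map (g : Int → Int) (l : List Int) (init : Int) :
    l.foldl (fun m i => if g i < m then g i else m) init =
      (l.map g).foldl (fun m x => if x < m then x else m) init := by
  rw [List.foldl_map]

-- ===== VERDICT (by name: the statement is the Claim_ definition above) =====
theorem findmini2_spec : Claim_equal_findmini2 := by
  intro nums _ hpre
  unfold Pre_findmini2 at hpre
  unfold Spec_findmini2 findmini2 findmini2_alt
  have hdiff : (PySem.List.pyRange 1 (nums.length : Int) 1).foldl
      (fun d i => d ++ [PySem.List.pyGetD nums i 0 - PySem.List.pyGetD nums (i - 1) 0]) [] =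
      (PySem.List.pyRange 1 (nums.length : Int) 1).map (pvF nums) := by
    simpa [pvF] using PySem.List.foldl_append_singleton_eq_map (pvF nums)
      (PySem.List.pyRange 1 (nums.length : Int) 1) []
  simp only [hdiff]
  have hlen : (((PySem.List.pyRange 1 (nums.length : Int) 1).map (pvF nums)).length : Int) =
      (nums.length : Int) - 1 := by
    simp [PySem.List.length_pyRange_one]; omega
  rw [hlen]
  conv_lhs => rw [pvFoldl_min_map]
  have hinit : PySem.List.pyGetD ((PySem.List.pyRange 1 (nums.length : Int) 1).map (pvF nums)) 1 0 +
      PySem.List.pyGetD ((PySem.List.pyRange 1 (nums.length : Int) 1).map (pvF nums)) 0 0 =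
      PySem.List.pyGetD nums 2 0 - PySem.List.pyGetD nums 0 0 := by
    rw [pvDiff_get nums 1 (by norm_num) (by omega), pvDiff_get nums 0 (by norm_num) (by omega)]
    unfold pvF
    norm_num
  have hmap : (PySem.List.pyRange 2 ((nums.length : Int) - 1) 1).map
        (fun i => PySem.List.pyGetD ((PySem.List.pyRange 1 (nums.length : Int) 1).map (pvF nums)) i 0 +
          PySem.List.pyGetD ((PySem.List.pyRange 1 (nums.length : Int) 1).map (pvF nums)) (i - 1) 0) =
      (PySem.List.pyRange 3 (nums.length : Int) 1).map
        (fun i => PySem.List.pyGetD nums i 0 - PySem.List.pyGetD nums (i - 2) 0) := by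
    apply List.ext_getElem
    · simp [PySem.List.length_pyRange_one]; omega
    · intro k h1 h2
      simp only [List.getElem_map, PySem.List.getElem_pyRange_one]
      have hb1 : (2 : Int) + k < (nums.length : Int) - 1 := by
        simp [PySem.List.length_pyRange_one] at h1; omega
      rw [pvDiff_get nums (2 + k) (by omega) hb1,
          pvDiff_get nums (2 + k - 1) (by omega) (by omega)]
      unfold pvF
      simp only [show (1 : Int) + (2 + (k : Int)) = 3 + k from by ring,
        show (3 : Int) + (k : Int) - 1 = 2 + k from by ring,
        show (1 : Int) + (2 + (k : Int) - 1) = 2 + k from by ring,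
        show (3 : Int) + (k : Int) - 2 = 1 + k from by ring]
      ring_nf
  rw [hinit, hmap]
  exact (pvFoldl_min_map _ _ _).symm
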